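-- pv_equiv track=rewrite | github.com/ShanGouXueHui/oris | scripts/lib/compiler_compare_engine.py | _detect_deliverables
-- ===== SOURCE A (Python) =====
-- def _detect_deliverables(base_case: dict):
--     vals = base_case.get("deliverables") or base_case.get("required_artifacts") or []
--     out = []
--     for x in vals:
--         s = str(x).strip().lower()
--         if s in ["word", "excel", "ppt", "pptx"]:
--             out.append("ppt" if s == "pptx" else s)
--     return sorted(set(out))
-- ===== SOURCE B (Python) =====
-- def _detect_deliverables(base_case: dict):
--     vals = base_case.get("deliverables") or base_case.get("required_artifacts") or []
--     aliases = {"excel": ("excel",), "ppt": ("ppt", "pptx"), "word": ("word",)}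
--     return [c for c in ("excel", "ppt", "word")
--             if any(str(x).strip().lower() in aliases[c] for x in vals)]
-- ===== Notes on version B (the rewrite author's own statement) =====
-- stated objective: simpler
-- what changed: B inverts the traversal: instead of a pass over the input collecting normalized hits into a list, deduplicating with set() and sorting, it loops over the fixed ordered candidate categories and emits each one for which any() input element normalizes to one of its aliases - no set, no accumulator, no sort.
import Mathlib
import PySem

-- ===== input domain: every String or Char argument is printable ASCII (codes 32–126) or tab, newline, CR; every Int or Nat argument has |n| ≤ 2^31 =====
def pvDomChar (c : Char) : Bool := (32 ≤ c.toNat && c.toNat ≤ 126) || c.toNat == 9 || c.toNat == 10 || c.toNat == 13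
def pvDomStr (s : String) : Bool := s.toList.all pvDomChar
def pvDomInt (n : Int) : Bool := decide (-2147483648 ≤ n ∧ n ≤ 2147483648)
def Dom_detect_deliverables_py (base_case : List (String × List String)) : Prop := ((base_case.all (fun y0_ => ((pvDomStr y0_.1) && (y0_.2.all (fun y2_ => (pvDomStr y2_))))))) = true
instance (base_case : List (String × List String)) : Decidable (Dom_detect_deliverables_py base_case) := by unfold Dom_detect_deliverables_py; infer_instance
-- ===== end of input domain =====

-- B inverts the traversal: instead of collecting normalized hits, deduplicating with set()
-- and sorting, it scans the fixed ordered candidate categories and keeps each one some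
-- input element normalizes to (alias test via any()) — objective: simpler.

-- ===== PORT A =====
def detect_deliverables_py (base_case : List (String × List String)) : List String :=
  let d1 := ((PySem.Dict.mk base_case).get? "deliverables").getD []
  let vals := if d1 ≠ [] then d1 else ((PySem.Dict.mk base_case).get? "required_artifacts").getD []
  let out := vals.foldl (fun out x =>
    let s := PySem.Str.lower (PySem.Str.strip x)
    if s ∈ ["word", "excel", "ppt", "pptx"] then
      out ++ [if s = "pptx" then "ppt" else s]
    else out) []
  PySem.List.sorted (PySem.Set.ofList out) (fun c => c) false

-- ===== PORT B =====
-- Source B's aliases table (tuples of accepted spellings per canonical category)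
def pvAliases : PySem.Dict String (List String) :=
  PySem.Dict.mk [("excel", ["excel"]), ("ppt", ["ppt", "pptx"]), ("word", ["word"])]

def detect_deliverables_py_alt (base_case : List (String × List String)) : List String :=
  let d1 := ((PySem.Dict.mk base_case).get? "deliverables").getD []
  let vals := if d1 ≠ [] then d1 else ((PySem.Dict.mk base_case).get? "required_artifacts").getD []
  ["excel", "ppt", "word"].filter (fun c =>
    vals.any (fun x =>
      ((PySem.Dict.get? pvAliases c).getD []).contains (PySem.Str.lower (PySem.Str.strip x))))

-- ===== PRECONDITION & SPEC =====
def Spec_detect_deliverables_py (base_case : List (String × List String)) (out : List String) : Prop := out = detect_deliverables_py_alt base_case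
instance (base_case : List (String × List String)) (out : List String) : Decidable (Spec_detect_deliverables_py base_case out) := by unfold Spec_detect_deliverables_py; infer_instance

-- ===== CLAIM (what is proved, stated in full; the proofs are below) =====
def Claim_equal_detect_deliverables_py : Prop := ∀ (base_case : List (String × List String)), Dom_detect_deliverables_py base_case → Spec_detect_deliverables_py base_case (detect_deliverables_py base_case)

-- ===== LEMMAS AND PROOFS =====

-- the canonical category element x contributes in A's loop (proof-side characterisation)
def pvCanonOf (x : String) : Option String :=
  let s := PySem.Str.lower (PySem.Str.strip x)
  if s ∈ ["word", "excel", "ppt", "pptx"] then some (if s = "pptx" then "ppt" else s)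
  else none

theorem foldA_eq (vals : List String) (acc : List String) :
    vals.foldl (fun out x =>
      let s := PySem.Str.lower (PySem.Str.strip x)
      if s ∈ ["word", "excel", "ppt", "pptx"] then
        out ++ [if s = "pptx" then "ppt" else s]
      else out) acc = acc ++ vals.filterMap pvCanonOf := by
  induction vals generalizing acc with
  | nil => simp
  | cons y t ih =>
    rw [List.foldl_cons, List.filterMap_cons]
    by_cases h : PySem.Str.lower (PySem.Str.strip y) ∈ ["word", "excel", "ppt", "pptx"]
    · have hy : pvCanonOf y = some (if PySem.Str.lower (PySem.Str.strip y) = "pptx" then "ppt"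
          else PySem.Str.lower (PySem.Str.strip y)) := by simp [pvCanonOf, h]
      rw [hy]
      simp only [h, if_pos]
      rw [ih, List.append_assoc]
      rfl
    · have hy : pvCanonOf y = none := by simp [pvCanonOf, h]
      rw [hy]
      simp only [h, ite_false]
      exact ih acc

theorem canon_range {x c : String} (h : pvCanonOf x = some c) :
    c ∈ ["excel", "ppt", "word"] := by
  rw [pvCanonOf] at h
  by_cases hm : PySem.Str.lower (PySem.Str.strip x) ∈ ["word", "excel", "ppt", "pptx"]
  · simp only [hm, if_pos, Option.some_inj] at h
    subst h
    simp only [List.mem_cons, List.not_mem_nil, or_false] at hm ⊢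
    rcases hm with h1 | h1 | h1 | h1 <;> simp [h1]
  · simp [hm] at h

theorem sorted_ofList_eq_filter (L : List String) (hL : ∀ c ∈ L, c ∈ ["excel", "ppt", "word"]) :
    PySem.List.sorted (PySem.Set.ofList L) (fun c => c) false
      = ["excel", "ppt", "word"].filter (fun c => PySem.Set.contains (PySem.Set.ofList L) c) := by
  apply PySem.List.sorted_eq_of_perm_of_pairwise_lt
  · rw [List.perm_ext_iff_of_nodup (List.Nodup.filter _ (by decide)) (PySem.Set.nodup_ofList L)]
    intro c
    simp only [List.mem_filter, PySem.Set.contains_iff, PySem.Set.mem_ofList]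
    constructor
    · rintro ⟨_, h⟩; simpa using h
    · intro h; exact ⟨hL c (by simpa using h), by simpa using h⟩
  · exact List.Pairwise.filter _ (by simp [String.lt_iff_toList_lt]; refine ⟨?_, ?_⟩ <;> decide)

-- per-element bridge: for a canonical category c, "some alias of c matches x" = "x canonicalizes to c"
theorem alias_norm_iff (c s : String) (hc : c ∈ (["excel", "ppt", "word"] : List String)) :
    (((PySem.Dict.get? pvAliases c).getD []).contains s)
      = ((if s ∈ (["word", "excel", "ppt", "pptx"] : List String) then
            some (if s = "pptx" then "ppt" else s) else none) == some c) := by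
  fin_cases hc <;>
  · by_cases h1 : s = "word" <;> by_cases h2 : s = "excel" <;> by_cases h3 : s = "ppt" <;>
      by_cases h4 : s = "pptx" <;>
      first
      | (subst_vars; rfl)
      | simp [pvAliases, PySem.Dict.get?, h1, h2, h3, h4]

-- per-element bridge: for a canonical category c, "some alias of c matches x" = "x canonicalizes to c"
theorem alias_iff (c x : String) (hc : c ∈ (["excel", "ppt", "word"] : List String)) :
    (((PySem.Dict.get? pvAliases c).getD []).contains (PySem.Str.lower (PySem.Str.strip x)))
      = (pvCanonOf x == some c) := by
  rw [alias_norm_iff _ _ hc, pvCanonOf]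

theorem alias_any_eq (c : String) (vals : List String)
    (hc : c ∈ (["excel", "ppt", "word"] : List String)) :
    PySem.Set.contains (PySem.Set.ofList (vals.filterMap pvCanonOf)) c
      = vals.any (fun x =>
          ((PySem.Dict.get? pvAliases c).getD []).contains (PySem.Str.lower (PySem.Str.strip x))) := by
  rw [Bool.eq_iff_iff]
  simp only [PySem.Set.contains_iff, PySem.Set.mem_ofList, List.mem_filterMap,
    List.any_eq_true, alias_iff _ _ hc, beq_iff_eq]

-- ===== VERDICT (by name: the statement is the Claim_ definition above) =====
theorem detect_deliverables_py_spec : Claim_equal_detect_deliverables_py := by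
  intro base_case _
  unfold Spec_detect_deliverables_py
  simp only [detect_deliverables_py, detect_deliverables_py_alt]
  rw [foldA_eq, List.nil_append]
  rw [sorted_ofList_eq_filter _ (fun c hc => by
    rw [List.mem_filterMap] at hc; obtain ⟨x, _, hx⟩ := hc; exact canon_range hx)]
  apply List.filter_congr
  intro c hc
  rw [alias_any_eq c _ hc]
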